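-- pv_equiv track=rewrite | github.com/Thorsten7712/iserlohn-sitzungen-ics | scripts/build.py | unfold_lines
-- ===== SOURCE A (Python) =====
-- from typing import List, Dict
--
-- def unfold_lines(text: str) -> List[str]:
--     raw_lines = text.splitlines()
--     if not raw_lines:
--         return []
--     out = [raw_lines[0]]
--     for line in raw_lines[1:]:
--         if line.startswith(" ") or line.startswith("\t"):
--             out[-1] += line[1:]
--         else:
--             out.append(line)
--     return out
-- ===== SOURCE B (Python) =====
-- from typing import List
--
-- def unfold_lines(text: str) -> List[str]:
--     raw_lines = text.splitlines()
--     if not raw_lines: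
--         return []
--     out: List[str] = []
--     pending = ""
--     for line in reversed(raw_lines[1:]):
--         if line.startswith(" ") or line.startswith("\t"):
--             pending = line[1:] + pending
--         else:
--             out.append(line + pending)
--             pending = ""
--     out.append(raw_lines[0] + pending)
--     out.reverse()
--     return out
-- ===== Notes on version B (the rewrite author's own statement) =====
-- stated objective: alternative
-- what changed: B traverses the lines right-to-left carrying a pending-suffix accumulator of continuation fragments and builds the output back-to-front (reversed at the end), instead of A's forward pass that appends each continuation onto out[-1].
import Mathlib
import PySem

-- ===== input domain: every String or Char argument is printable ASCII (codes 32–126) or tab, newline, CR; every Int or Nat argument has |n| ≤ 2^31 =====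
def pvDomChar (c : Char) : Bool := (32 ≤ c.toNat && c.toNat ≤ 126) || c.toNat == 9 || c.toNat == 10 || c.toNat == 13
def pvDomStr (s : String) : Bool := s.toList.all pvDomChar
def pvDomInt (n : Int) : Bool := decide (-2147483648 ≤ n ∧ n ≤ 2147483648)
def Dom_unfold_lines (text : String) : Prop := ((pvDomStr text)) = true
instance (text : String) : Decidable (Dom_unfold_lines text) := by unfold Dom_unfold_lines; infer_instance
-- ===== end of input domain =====

-- B traverses the lines right-to-left with a pending-suffix accumulator and builds the
-- output back-to-front, instead of A's forward pass patching out[-1] (objective: alternative).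

-- ===== PORT A =====
-- is `line` a folded continuation line (starts with space or tab)?
def pvIsCont (line : String) : Bool :=
  PySem.Str.startswith line " " || PySem.Str.startswith line "\t"

-- body of A's for-loop; `out` is always nonempty when it runs, so out[-1] is getLastD
def pvStepA (out : List String) (line : String) : List String :=
  if pvIsCont line then
    out.dropLast ++ [out.getLastD "" ++ PySem.Str.slice line (some 1) none]
  else
    out ++ [line]

def unfold_lines (text : String) : List String :=
  match PySem.Str.splitlines text with
  | [] => []                                    -- if not raw_lines: return []
  | first :: rest => rest.foldl pvStepA [first] -- out = [raw_lines[0]]; for line in raw_lines[1:]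

-- ===== PORT B =====
-- body of B's loop over reversed(raw_lines[1:]); state = (out, pending)
def pvStepB (st : List String × String) (line : String) : List String × String :=
  if pvIsCont line then (st.1, PySem.Str.slice line (some 1) none ++ st.2)
  else (st.1 ++ [line ++ st.2], "")

def unfold_lines_alt (text : String) : List String :=
  match PySem.Str.splitlines text with
  | [] => []
  | first :: rest =>
    let st := rest.reverse.foldl pvStepB ([], "")   -- for line in reversed(raw_lines[1:])
    (st.1 ++ [first ++ st.2]).reverse               -- out.append(raw_lines[0]+pending); out.reverse()

-- ===== PRECONDITION & SPEC =====
def Spec_unfold_lines (text : String) (out : List String) : Prop := out = unfold_lines_alt text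
instance (text : String) (out : List String) : Decidable (Spec_unfold_lines text out) := by unfold Spec_unfold_lines; infer_instance

-- ===== CLAIM (what is proved, stated in full; the proofs are below) =====
def Claim_equal_unfold_lines : Prop := ∀ (text : String), Dom_unfold_lines text → Spec_unfold_lines text (unfold_lines text)

-- ===== LEMMAS AND PROOFS =====

-- A's fold leaves any prefix before the (nonempty) tail untouched
theorem pvFoldA_prefix (ls : List String) :
    ∀ (acc : List String) (first : String),
      ls.foldl pvStepA (acc ++ [first]) = acc ++ ls.foldl pvStepA [first] := by
  induction ls with
  | nil => intro acc first; simp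
  | cons l ls ih =>
    intro acc first
    by_cases h : pvIsCont l = true
    · have hstep : pvStepA (acc ++ [first]) l =
          acc ++ [first ++ PySem.Str.slice l (some 1) none] := by
        simp [pvStepA, h]
      simp only [List.foldl_cons, hstep, ih]
      have hstep1 : pvStepA [first] l = [first ++ PySem.Str.slice l (some 1) none] := by
        simp [pvStepA, h]
      rw [hstep1]
    · have hstep : pvStepA (acc ++ [first]) l = (acc ++ [first]) ++ [l] := by
        simp [pvStepA, h]
      have hstep1 : pvStepA [first] l = [first] ++ [l] := by simp [pvStepA, h]
      simp only [List.foldl_cons, hstep, hstep1]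
      rw [ih (acc ++ [first]) l, ih [first] l]
      simp

-- main invariant: A's forward fold equals B's backward fold (written as foldr), reversed
theorem pvMain (rest : List String) :
    ∀ (first : String),
      rest.foldl pvStepA [first] =
        (let st := rest.foldr (fun line st => pvStepB st line) (([] : List String), "")
         (st.1 ++ [first ++ st.2]).reverse) := by
  induction rest with
  | nil => intro first; simp
  | cons l ls ih =>
    intro first
    simp only [List.foldr_cons, List.foldl_cons]
    by_cases h : pvIsCont l = true
    · have hstep : pvStepA [first] l = [first ++ PySem.Str.slice l (some 1) none] := by
        simp [pvStepA, h]
      rw [hstep, ih]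
      simp only [pvStepB, h, if_pos]
      rw [← String.append_assoc]
    · have hstep : pvStepA [first] l = [first] ++ [l] := by simp [pvStepA, h]
      rw [hstep, pvFoldA_prefix ls [first] l, ih]
      simp [pvStepB, h]

-- ===== VERDICT (by name: the statement is the Claim_ definition above) =====
theorem unfold_lines_spec : Claim_equal_unfold_lines := by
  intro text _
  unfold Spec_unfold_lines unfold_lines unfold_lines_alt
  cases hs : PySem.Str.splitlines text with
  | nil => rfl
  | cons first rest =>
    simp only [List.foldl_reverse]
    have := pvMain rest first
    simpa using this
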